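-- pv_equiv track=rewrite | github.com/Yusiwon/Programmers_Python | src/연습문제/level0/옹알이(1).py | solution
-- ===== SOURCE A (Python) =====
-- def solution(babbling):
--     answer = 0
--
--     for word in babbling:
--         index = 0
--
--         for i in range(1, len(word)+1):
--             if word[index:i] in ['aya', 'ye', 'woo', 'ma']:
--                 index = i
--
--         if index == len(word):
--             answer += 1
--     return answer
-- ===== SOURCE B (Python) =====
-- def solution(babbling):
--     def ok(w):
--         if w == "":
--             return True
--         if w.startswith("aya"):
--             return ok(w[3:])
--         if w.startswith("ye"):
--             return ok(w[2:])
--         if w.startswith("woo"):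
--             return ok(w[3:])
--         if w.startswith("ma"):
--             return ok(w[2:])
--         return False
--     return sum(1 for w in babbling if ok(w))
-- ===== Notes on version B (the rewrite author's own statement) =====
-- stated objective: faster
-- what changed: Replaces A's quadratic per-word scan over all slice endpoints with a single left-to-right greedy token match (the four tokens are prefix-free, so the greedy step is the unique possible one).
import Mathlib
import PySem

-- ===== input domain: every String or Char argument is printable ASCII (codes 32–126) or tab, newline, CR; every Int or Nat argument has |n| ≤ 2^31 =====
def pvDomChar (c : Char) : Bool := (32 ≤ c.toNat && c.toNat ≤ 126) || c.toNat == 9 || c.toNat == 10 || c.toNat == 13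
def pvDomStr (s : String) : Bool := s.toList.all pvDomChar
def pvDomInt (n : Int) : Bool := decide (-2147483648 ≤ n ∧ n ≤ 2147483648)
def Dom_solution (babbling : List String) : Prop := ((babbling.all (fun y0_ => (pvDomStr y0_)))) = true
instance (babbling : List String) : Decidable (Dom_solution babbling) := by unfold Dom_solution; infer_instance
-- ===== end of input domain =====

-- B replaces A's per-word scan over all slice endpoints by one left-to-right greedy
-- token match (the four tokens are prefix-free), a different and faster algorithm.

-- ===== PORT A =====
-- inner loop of A for one word: for i in range(1, len(word)+1): if word[index:i] in [...]: index = i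
def innerA (word : String) : Int :=
  (PySem.List.pyRange 1 (PySem.Str.len word + 1) 1).foldl
    (fun index i =>
      if ["aya", "ye", "woo", "ma"].contains (PySem.Str.slice word (some index) (some i))
      then i else index) 0

def solution (babbling : List String) : Int :=
  babbling.foldl
    (fun answer word =>
      if innerA word = PySem.Str.len word then answer + 1 else answer) 0

-- ===== PORT B =====
-- greedy recursion ok(w) of Source B, on the character list (each startswith test = one pattern)
def okB : List Char → Bool
  | [] => true
  | 'a' :: 'y' :: 'a' :: r => okB r
  | 'y' :: 'e' :: r => okB r
  | 'w' :: 'o' :: 'o' :: r => okB r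
  | 'm' :: 'a' :: r => okB r
  | _ => false

def solution_alt (babbling : List String) : Int :=
  ((babbling.filter (fun w => okB w.toList)).map (fun _ => (1 : Int))).sum

-- ===== PRECONDITION & SPEC =====
def Spec_solution (babbling : List String) (out : Int) : Prop := out = solution_alt babbling
instance (babbling : List String) (out : Int) : Decidable (Spec_solution babbling out) := by unfold Spec_solution; infer_instance

-- ===== CLAIM (what is proved, stated in full; the proofs are below) =====
def Claim_equal_solution : Prop := ∀ (babbling : List String), Dom_solution babbling → Spec_solution babbling (solution babbling)

-- ===== LEMMAS AND PROOFS =====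

-- the four tokens as character lists
def toksL : List (List Char) := [['a','y','a'], ['y','e'], ['w','o','o'], ['m','a']]

-- A's loop step, moved to the character-list side
def stepL (cs : List Char) (index i : Int) : Int :=
  if PySem.List.slice cs (some index) (some i) ∈ toksL then i else index

lemma toks_prefix_free : ∀ t1 ∈ toksL, ∀ t2 ∈ toksL, t1 <+: t2 → t1 = t2 := by decide

lemma toks_len_pos : ∀ t ∈ toksL, 0 < t.length := by decide

-- A's membership test equals the list-side test
lemma contains_slice (w : String) (a b : Int) :
    (["aya", "ye", "woo", "ma"].contains (PySem.Str.slice w (some a) (some b)) = true) ↔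
      PySem.List.slice w.toList (some a) (some b) ∈ toksL := by
  rw [List.contains_iff_mem]
  have hb : (PySem.Str.slice w (some a) (some b)).toList =
      PySem.List.slice w.toList (some a) (some b) := by
    simp [PySem.Str.toList_slice]
  rw [show toksL = (["aya", "ye", "woo", "ma"].map String.toList) from rfl,
      ← hb]
  exact (List.mem_map_of_injective (fun _ _ h => String.ext_iff.mpr h)).symm

lemma fold_noop {α β : Type} (f : α → β → α) (a : α) (l : List β)
    (h : ∀ b ∈ l, f a b = a) : l.foldl f a = a := by
  induction l with
  | nil => rfl
  | cons x xs ih =>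
    rw [List.foldl_cons, h x (by simp)]
    exact ih (fun b hb => h b (by simp [hb]))

-- a token found by A's slice test is a prefix of the remaining suffix
lemma mem_toks_of_slice (cs : List Char) (p : ℕ) (i : ℤ) (hpi : (p : ℤ) ≤ i)
    (h : PySem.List.slice cs (some (p : ℤ)) (some i) ∈ toksL) :
    ∃ t ∈ toksL, t <+: cs.drop p ∧ (t.length : ℤ) ≤ i - p := by
  rw [PySem.List.slice_toNat cs (by exact_mod_cast Nat.zero_le p) (by omega)] at h
  simp only [Int.toNat_natCast] at h
  refine ⟨_, h, List.take_prefix _ _, ?_⟩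
  have hlen := List.length_take_le (i.toNat - p) (List.drop p cs)
  omega

-- no-op step: the slice cannot be a token
lemma step_noop (cs : List Char) (p : ℕ) (i : ℤ) (hpi : (p : ℤ) ≤ i)
    (hno : ∀ t ∈ toksL, t <+: cs.drop p → ¬ ((t.length : ℤ) ≤ i - p)) :
    stepL cs p i = p := by
  unfold stepL
  rw [if_neg]
  intro h
  obtain ⟨t, ht, hpre, hlen⟩ := mem_toks_of_slice cs p i hpi h
  exact hno t ht hpre hlen

-- the step at exactly the token boundary fires
lemma step_hit (cs : List Char) (p : ℕ) (t : List Char) (ht : t ∈ toksL)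
    (hpre : t <+: cs.drop p) :
    stepL cs p ((p : ℤ) + t.length) = (p : ℤ) + t.length := by
  unfold stepL
  rw [if_pos]
  have : ((p : ℤ) + t.length) = ((p + t.length : ℕ) : ℤ) := by push_cast; ring
  rw [this, PySem.List.slice_natCast]
  obtain ⟨r, hr⟩ := hpre
  rw [← hr]
  simpa using ht

-- main per-word characterisation of A's inner loop
lemma main_fold (cs : List Char) : ∀ k p : ℕ, p ≤ cs.length → cs.length - p ≤ k →
    (((PySem.List.pyRange ((p : ℤ) + 1) ((cs.length : ℤ) + 1) 1).foldl (stepL cs) (p : ℤ)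
        = (cs.length : ℤ)) ↔ okB (cs.drop p) = true) := by
  intro k
  induction k with
  | zero =>
    intro p hp hk
    have hpn : p = cs.length := by omega
    subst hpn
    rw [PySem.List.pyRange_one_eq_nil (by omega), List.foldl_nil, List.drop_length]
    simp [okB]
  | succ k ih =>
    intro p hp hk
    rcases Nat.eq_or_lt_of_le hp with hpn | hplt
    · subst hpn
      rw [PySem.List.pyRange_one_eq_nil (by omega), List.foldl_nil, List.drop_length]
      simp [okB]
    -- generic treatment of one greedy token step
    have tok_case : ∀ t ∈ toksL, ∀ r : List Char, cs.drop p = t ++ r →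
        (((PySem.List.pyRange ((p : ℤ) + 1) ((cs.length : ℤ) + 1) 1).foldl (stepL cs) (p : ℤ)
          = (cs.length : ℤ)) ↔ okB r = true) := by
      intro t ht r hdr
      have hL : 0 < t.length := toks_len_pos t ht
      have hlen : t.length + r.length = cs.length - p := by
        have := congrArg List.length hdr
        simp [List.length_drop] at this
        omega
      have hpL : p + t.length ≤ cs.length := by omega
      have hpre : t <+: cs.drop p := ⟨r, hdr.symm⟩
      -- split the range [p+1, n+1) at p+|t| and p+|t|+1
      rw [PySem.List.pyRange_one_append ((p:ℤ)+1) ((p:ℤ)+t.length) ((cs.length:ℤ)+1)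
            (by omega) (by exact_mod_cast by omega),
          List.foldl_append,
          PySem.List.pyRange_one_cons (a := (p:ℤ)+t.length) (by exact_mod_cast by omega),
          List.foldl_cons]
      -- first segment is a no-op
      rw [fold_noop (stepL cs) ((p:ℤ)) _ (by
        intro i hi
        rw [PySem.List.mem_pyRange_one] at hi
        refine step_noop cs p i (by omega) ?_
        intro t' ht' hpre' hlen'
        have htt : t' = t := by
          rcases List.prefix_or_prefix_of_prefix hpre' hpre with h' | h'
          · exact toks_prefix_free t' ht' t ht h'
          · exact (toks_prefix_free t ht t' ht' h').symm
        rw [htt] at hlen'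
        omega)]
      -- the boundary step fires
      rw [step_hit cs p t ht hpre]
      -- rest is the fold from p + |t|
      have hcast : (p : ℤ) + t.length = ((p + t.length : ℕ) : ℤ) := by push_cast; ring
      have hdrop : cs.drop (p + t.length) = r := by
        rw [← List.drop_drop, hdr, List.drop_left]
      rw [hcast, ← hdrop]
      exact ih (p + t.length) hpL (by omega)
    -- case split on the shape of the suffix, following okB's match
    rcases hd : cs.drop p with _ | ⟨c, d⟩
    · exact absurd (List.drop_eq_nil_iff.mp hd) (by omega)
    rw [okB.eq_def]
    split
    · rename_i heq; exact (List.cons_ne_nil c d heq).elim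
    · rename_i r heq
      exact (by simpa [hd, heq] using tok_case ['a','y','a'] (by decide) r (by rw [hd, heq]; rfl))
    · rename_i r heq
      exact (by simpa [hd, heq] using tok_case ['y','e'] (by decide) r (by rw [hd, heq]; rfl))
    · rename_i r heq
      exact (by simpa [hd, heq] using tok_case ['w','o','o'] (by decide) r (by rw [hd, heq]; rfl))
    · rename_i r heq
      exact (by simpa [hd, heq] using tok_case ['m','a'] (by decide) r (by rw [hd, heq]; rfl))
    · -- no token matches: the loop never advances and p < n
      rename_i h1 h2 h3 h4 h5
      rw [fold_noop (stepL cs) ((p:ℤ)) _ (by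
        intro i hi
        rw [PySem.List.mem_pyRange_one] at hi
        refine step_noop cs p i (by omega) ?_
        intro t' ht' hpre' _
        obtain ⟨r, hr⟩ := hpre'
        rw [hd] at hr
        fin_cases ht'
        · exact h2 r (by exact hr.symm)
        · exact h3 r (by exact hr.symm)
        · exact h4 r (by exact hr.symm)
        · exact h5 r (by exact hr.symm))]
      constructor
      · intro hpn; exact absurd (by exact_mod_cast hpn) (by omega)
      · intro hfalse; cases hfalse

lemma innerA_eq (w : String) :
    (innerA w = PySem.Str.len w) ↔ okB w.toList = true := by
  have hstep : (fun (index i : Int) =>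
      if ["aya", "ye", "woo", "ma"].contains (PySem.Str.slice w (some index) (some i))
      then i else index) = stepL w.toList := by
    funext index i
    unfold stepL
    by_cases h : PySem.List.slice w.toList (some index) (some i) ∈ toksL
    · rw [if_pos ((contains_slice w index i).mpr h), if_pos h]
    · rw [if_neg (fun hc => h ((contains_slice w index i).mp hc)), if_neg h]
  have h0 : ((0 : ℕ) : ℤ) = (0 : ℤ) := rfl
  have := main_fold w.toList (w.toList.length) 0 (Nat.zero_le _) (by omega)
  rw [List.drop_zero] at this
  unfold innerA
  rw [hstep, PySem.Str.len_eq]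
  simpa using this

lemma outer_fold (bs : List String) (a : Int) :
    bs.foldl (fun answer word => if innerA word = PySem.Str.len word then answer + 1 else answer) a
      = a + ((bs.filter (fun w => okB w.toList)).map (fun _ => (1 : Int))).sum := by
  induction bs generalizing a with
  | nil => simp
  | cons w ws ih =>
    rw [List.foldl_cons, List.filter_cons]
    by_cases h : okB w.toList = true
    · rw [if_pos ((innerA_eq w).mpr h), if_pos (by exact h), List.map_cons, List.sum_cons, ih]
      ring
    · rw [if_neg (fun hc => h ((innerA_eq w).mp hc)), if_neg (by simpa using h), ih]

-- ===== VERDICT (by name: the statement is the Claim_ definition above) =====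
theorem solution_spec : Claim_equal_solution := by
  intro bs _
  show solution bs = solution_alt bs
  simpa [solution, solution_alt] using outer_fold bs 0
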